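-- pv_equiv track=rewrite | github.com/thebitsamuraii23/api-ai | bot/handlers.py | _contains_math_notation
-- ===== SOURCE A (Python) =====
-- def _contains_math_notation(text: str) -> bool:
--     markers = (
--         "$$",
--         r"\(",
--         r"\)",
--         r"\[",
--         r"\]",
--         r"\begin{",
--         r"\end{",
--         r"\frac",
--         r"\sum",
--         r"\int",
--         r"\sqrt",
--         r"\cdot",
--         r"\times",
--         r"\div",
--         r"\leq",
--         r"\geq",
--         r"\alpha",
--         r"\beta",
--         r"\gamma",
--         r"\delta",
--         r"\theta",
--         r"\lambda",
--         r"\pi",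
--         r"\sigma",
--         r"\phi",
--         r"\omega",
--         r"\log",
--         r"\ln",
--         r"\sin",
--         r"\cos",
--         r"\tan",
--     )
--     return any(marker in text for marker in markers)
-- ===== SOURCE B (Python) =====
-- _BACKSLASH_SUFFIXES = (
--     "(", ")", "[", "]", "begin{", "end{", "frac", "sum", "int", "sqrt",
--     "cdot", "times", "div", "leq", "geq", "alpha", "beta", "gamma",
--     "delta", "theta", "lambda", "pi", "sigma", "phi", "omega",
--     "log", "ln", "sin", "cos", "tan",
-- )
--
--
-- def _contains_math_notation(text: str) -> bool:
--     # Single left-to-right scan: every marker is either "$$" or a backslash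
--     # followed by a known suffix, so dispatch on the current character.
--     for i, ch in enumerate(text):
--         if ch == "$":
--             if text.startswith("$", i + 1):
--                 return True
--         elif ch == "\\":
--             if text.startswith(_BACKSLASH_SUFFIXES, i + 1):
--                 return True
--     return False
-- ===== Notes on version B (the rewrite author's own statement) =====
-- stated objective: alternative
-- what changed: Replaces the 31 independent whole-text substring membership tests (one per marker) by a single left-to-right scan that at each position dispatches on the current character (dollar or backslash) and checks the corresponding marker tails with startswith.
import Mathlib
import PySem

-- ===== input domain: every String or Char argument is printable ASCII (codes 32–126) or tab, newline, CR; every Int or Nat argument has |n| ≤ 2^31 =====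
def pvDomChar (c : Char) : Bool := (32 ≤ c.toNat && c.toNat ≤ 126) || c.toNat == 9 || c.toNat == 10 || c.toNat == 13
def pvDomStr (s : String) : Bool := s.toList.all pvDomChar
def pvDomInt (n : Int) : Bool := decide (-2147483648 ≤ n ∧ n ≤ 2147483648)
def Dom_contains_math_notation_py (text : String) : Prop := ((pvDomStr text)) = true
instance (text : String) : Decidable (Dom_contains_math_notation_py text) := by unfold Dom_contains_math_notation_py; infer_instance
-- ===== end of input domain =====

-- B replaces the 31 separate substring searches by one left-to-right scan that
-- dispatches on the current character ('$' or '\'); same return value, alternative algorithm.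

-- ===== PORT A =====
-- A's marker tuple, verbatim.
def pvMarkers : List String :=
  ["$$", "\\(", "\\)", "\\[", "\\]", "\\begin{", "\\end{", "\\frac", "\\sum", "\\int",
   "\\sqrt", "\\cdot", "\\times", "\\div", "\\leq", "\\geq", "\\alpha", "\\beta",
   "\\gamma", "\\delta", "\\theta", "\\lambda", "\\pi", "\\sigma", "\\phi", "\\omega",
   "\\log", "\\ln", "\\sin", "\\cos", "\\tan"]

-- any(marker in text for marker in markers)
def contains_math_notation_py (text : String) : Bool :=
  pvMarkers.any (fun marker => PySem.Str.isIn marker text)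

-- ===== PORT B =====
-- B's tuple of suffixes that may follow a backslash, verbatim.
def pvSuffixes : List (List Char) :=
  [['('], [')'], ['['], [']'],
   ['b','e','g','i','n','{'], ['e','n','d','{'], ['f','r','a','c'], ['s','u','m'],
   ['i','n','t'], ['s','q','r','t'], ['c','d','o','t'], ['t','i','m','e','s'],
   ['d','i','v'], ['l','e','q'], ['g','e','q'], ['a','l','p','h','a'],
   ['b','e','t','a'], ['g','a','m','m','a'], ['d','e','l','t','a'],
   ['t','h','e','t','a'], ['l','a','m','b','d','a'], ['p','i'],
   ['s','i','g','m','a'], ['p','h','i'], ['o','m','e','g','a'],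
   ['l','o','g'], ['l','n'], ['s','i','n'], ['c','o','s'], ['t','a','n']]

-- the 'for i, ch in enumerate(text)' loop; text.startswith(p, i+1) is exactly
-- 'p is a prefix of the rest of the character list', so List.isPrefixOf is exact here.
def pvScan : List Char → Bool
  | [] => false
  | c :: rest =>
      if c = '$' then
        if List.isPrefixOf ['$'] rest then true else pvScan rest
      else if c = '\\' then
        if pvSuffixes.any (fun m => List.isPrefixOf m rest) then true else pvScan rest
      else pvScan rest

def contains_math_notation_py_alt (text : String) : Bool :=
  pvScan text.toList

-- ===== PRECONDITION & SPEC =====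
def Spec_contains_math_notation_py (text : String) (out : Bool) : Prop := out = contains_math_notation_py_alt text
instance (text : String) (out : Bool) : Decidable (Spec_contains_math_notation_py text out) := by unfold Spec_contains_math_notation_py; infer_instance

-- ===== CLAIM (what is proved, stated in full; the proofs are below) =====
def Claim_equal_contains_math_notation_py : Prop := ∀ (text : String), Dom_contains_math_notation_py text → Spec_contains_math_notation_py text (contains_math_notation_py text)

-- ===== LEMMAS AND PROOFS =====

-- A's markers, as character lists (pvMarkers.map String.toList, spelled out).
def pvMarkersL : List (List Char) :=
  [['$', '$'], ['\\', '('], ['\\', ')'], ['\\', '['], ['\\', ']'],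
   ['\\', 'b', 'e', 'g', 'i', 'n', '{'], ['\\', 'e', 'n', 'd', '{'],
   ['\\', 'f', 'r', 'a', 'c'], ['\\', 's', 'u', 'm'], ['\\', 'i', 'n', 't'],
   ['\\', 's', 'q', 'r', 't'], ['\\', 'c', 'd', 'o', 't'], ['\\', 't', 'i', 'm', 'e', 's'],
   ['\\', 'd', 'i', 'v'], ['\\', 'l', 'e', 'q'], ['\\', 'g', 'e', 'q'],
   ['\\', 'a', 'l', 'p', 'h', 'a'], ['\\', 'b', 'e', 't', 'a'],
   ['\\', 'g', 'a', 'm', 'm', 'a'], ['\\', 'd', 'e', 'l', 't', 'a'],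
   ['\\', 't', 'h', 'e', 't', 'a'], ['\\', 'l', 'a', 'm', 'b', 'd', 'a'],
   ['\\', 'p', 'i'], ['\\', 's', 'i', 'g', 'm', 'a'], ['\\', 'p', 'h', 'i'],
   ['\\', 'o', 'm', 'e', 'g', 'a'], ['\\', 'l', 'o', 'g'], ['\\', 'l', 'n'],
   ['\\', 's', 'i', 'n'], ['\\', 'c', 'o', 's'], ['\\', 't', 'a', 'n']]

lemma pvMarkers_toList : pvMarkers.map String.toList = pvMarkersL := by rfl

-- the head test of pvScan hits exactly when some marker is a prefix of c :: rest
lemma pvHead_iff (c : Char) (rest : List Char) :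
    ((if c = '$' then List.isPrefixOf ['$'] rest
      else if c = '\\' then pvSuffixes.any (fun m => List.isPrefixOf m rest)
      else false) = true) ↔ ∃ m ∈ pvMarkersL, m <+: c :: rest := by
  split_ifs with hc hb
  · subst hc
    simp [pvMarkersL, List.cons_prefix_cons, List.isPrefixOf_iff_prefix]
  · subst hb
    simp [pvMarkersL, pvSuffixes, List.cons_prefix_cons, List.isPrefixOf_iff_prefix]
  · simp only [false_iff]
    rintro ⟨m, hm, hp⟩
    fin_cases hm <;> rw [List.cons_prefix_cons] at hp <;> simp_all [eq_comm]

lemma pvScan_cons (c : Char) (rest : List Char) :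
    pvScan (c :: rest) =
      ((if c = '$' then List.isPrefixOf ['$'] rest
        else if c = '\\' then pvSuffixes.any (fun m => List.isPrefixOf m rest)
        else false) || pvScan rest) := by
  rw [pvScan]; split_ifs <;> simp [*]

lemma pvScan_iff : ∀ cs : List Char, pvScan cs = true ↔ ∃ m ∈ pvMarkersL, m <:+: cs := by
  intro cs
  induction cs with
  | nil => simp [pvScan]; decide
  | cons c rest ih =>
    rw [pvScan_cons, Bool.or_eq_true, pvHead_iff c rest, ih]
    simp only [List.infix_cons_iff]
    aesop

-- ===== VERDICT (by name: the statement is the Claim_ definition above) =====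
theorem contains_math_notation_py_spec : Claim_equal_contains_math_notation_py := by
  intro text _
  unfold Spec_contains_math_notation_py contains_math_notation_py contains_math_notation_py_alt
  rw [Bool.eq_iff_iff, List.any_eq_true, pvScan_iff, ← pvMarkers_toList]
  simp only [PySem.Str.isIn_iff_infix, List.mem_map]
  constructor
  · rintro ⟨s, hs, hi⟩; exact ⟨s.toList, ⟨s, hs, rfl⟩, hi⟩
  · rintro ⟨m, ⟨s, hs, rfl⟩, hi⟩; exact ⟨s, hs, hi⟩
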